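-- pv_equiv track=rewrite | github.com/meirelesgc/simcc-back | simcc/repositories/tools.py | build_query_terms
-- ===== SOURCE A (Python) =====
-- def build_query_terms(sanitized_terms, column):
--     terms_dict = {}
--     query_parts = []
--     term_counter = 1
--
--     for term in sanitized_terms:
--         if term in {'AND', 'OR', 'AND NOT', '(', ')'}:
--             query_parts.append(term)
--         else:
--             placeholder = f'term{term_counter}'
--             terms_dict[placeholder] = term
--             SCRIPT_SQL = f"""
--                 ts_rank(
--                 to_tsvector(
--                 translate(
--                 unaccent(
--                 LOWER({column})), '-\\.:;''',' ')),
--                 websearch_to_tsquery(%({placeholder})s)) > 0.04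
--                 """
--             query_parts.append(SCRIPT_SQL)
--             term_counter += 1
--
--     return ' '.join(query_parts), terms_dict
-- ===== SOURCE B (Python) =====
-- # Two-pass decomposition: build the placeholder dict by filtering first, then
-- # assemble the SQL fragments in a second pass consuming the placeholder names.
-- def build_query_terms(sanitized_terms, column):
--     kw = {'AND', 'OR', 'AND NOT', '(', ')'}
--     non_keywords = [t for t in sanitized_terms if t not in kw]
--     terms_dict = {f'term{i}': t for i, t in enumerate(non_keywords, 1)}
--     placeholders = iter(terms_dict)
--     query_parts = []
--     for term in sanitized_terms:
--         if term in kw: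
--             query_parts.append(term)
--         else:
--             placeholder = next(placeholders)
--             query_parts.append(f"""
--                 ts_rank(
--                 to_tsvector(
--                 translate(
--                 unaccent(
--                 LOWER({column})), '-\\.:;''',' ')),
--                 websearch_to_tsquery(%({placeholder})s)) > 0.04
--                 """)
--     return ' '.join(query_parts), terms_dict
-- ===== Notes on version B (the rewrite author's own statement) =====
-- stated objective: alternative
-- what changed: Replaces A's single interleaved loop (dict insertion, SQL fragment and counter updated together) with a two-phase decomposition: filter + enumerate builds the placeholder dict first, then a second pass over the terms assembles the fragments by consuming the prepared placeholder pairs.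
import Mathlib
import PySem

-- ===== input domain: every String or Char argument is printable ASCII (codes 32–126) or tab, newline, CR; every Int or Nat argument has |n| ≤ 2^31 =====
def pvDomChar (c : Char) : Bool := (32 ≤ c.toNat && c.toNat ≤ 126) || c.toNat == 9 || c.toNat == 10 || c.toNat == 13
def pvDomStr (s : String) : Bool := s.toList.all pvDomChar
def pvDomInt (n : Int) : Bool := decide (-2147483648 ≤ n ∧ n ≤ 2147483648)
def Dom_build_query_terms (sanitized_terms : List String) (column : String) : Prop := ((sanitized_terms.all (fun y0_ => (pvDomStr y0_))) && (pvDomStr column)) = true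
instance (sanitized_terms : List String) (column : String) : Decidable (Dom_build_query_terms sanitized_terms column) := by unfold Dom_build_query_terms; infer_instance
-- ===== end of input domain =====

-- B separates index construction from fragment assembly (filter + enumerate builds the
-- placeholder pairs first, a second pass consumes them) instead of A's single interleaved
-- loop with a running counter; same cost, different decomposition.

-- shared: membership in the keyword set {'AND', 'OR', 'AND NOT', '(', ')'}
def pvKw (t : String) : Bool :=
  t == "AND" || t == "OR" || t == "AND NOT" || t == "(" || t == ")"

-- the SQL fragment f-string (exact content of A's triple-quoted f-string)
def pvSnippet (column placeholder : String) : String :=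
  "\n                ts_rank(\n                to_tsvector(\n                translate(\n                unaccent(\n                LOWER(" ++ column ++ ")), '-\\.:;''',' ')),\n                websearch_to_tsquery(%(" ++ placeholder ++ ")s)) > 0.04\n                "

-- ===== PORT A =====
def build_query_terms (sanitized_terms : List String) (column : String) : String × (List (String × String)) :=
  let st := sanitized_terms.foldl
    (fun (st : PySem.Dict String String × List String × Int) term =>
      let (terms_dict, query_parts, term_counter) := st
      if pvKw term then
        (terms_dict, query_parts ++ [term], term_counter)
      else
        let placeholder := "term" ++ PySem.Int.toStr term_counter
        (terms_dict.insert placeholder term,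
         query_parts ++ [pvSnippet column placeholder],
         term_counter + 1))
    (PySem.Dict.empty, [], 1)
  (PySem.Str.join " " st.2.1, st.1.items)

-- ===== PORT B =====
-- second pass: consume the placeholder pairs (Python's iterator); [] case is Python's
-- StopIteration, unreachable since the pairs were built from exactly the non-keyword terms
def pvAssemble (column : String) : List String → List (String × String) → List String
  | [], _ => []
  | t :: ts, rem =>
    if pvKw t then t :: pvAssemble column ts rem
    else match rem with
      | [] => []
      | p :: rest => pvSnippet column p.1 :: pvAssemble column ts rest

def build_query_terms_alt (sanitized_terms : List String) (column : String) : String × (List (String × String)) :=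
  let non_keywords := sanitized_terms.filter (fun t => !pvKw t)
  let pairs := (PySem.List.enumerate non_keywords 1).map
    (fun p => ("term" ++ PySem.Int.toStr p.1, p.2))
  let terms_dict := PySem.Dict.ofList pairs
  let query_parts := pvAssemble column sanitized_terms pairs
  (PySem.Str.join " " query_parts, terms_dict.items)

-- ===== PRECONDITION & SPEC =====
def Spec_build_query_terms (sanitized_terms : List String) (column : String) (out : String × (List (String × String))) : Prop := out = build_query_terms_alt sanitized_terms column
instance (sanitized_terms : List String) (column : String) (out : String × (List (String × String))) : Decidable (Spec_build_query_terms sanitized_terms column out) := by unfold Spec_build_query_terms; infer_instance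

-- ===== CLAIM (what is proved, stated in full; the proofs are below) =====
def Claim_equal_build_query_terms : Prop := ∀ (sanitized_terms : List String) (column : String), Dom_build_query_terms sanitized_terms column → Spec_build_query_terms sanitized_terms column (build_query_terms sanitized_terms column)

-- ===== LEMMAS AND PROOFS =====

-- A's loop state after processing ts, from arbitrary (d, ps, c), expressed through B's pieces
lemma pv_loop (column : String) (ts : List String) :
    ∀ (d : PySem.Dict String String) (ps : List String) (c : Int),
    ts.foldl
      (fun (st : PySem.Dict String String × List String × Int) term =>
        let (terms_dict, query_parts, term_counter) := st
        if pvKw term then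
          (terms_dict, query_parts ++ [term], term_counter)
        else
          let placeholder := "term" ++ PySem.Int.toStr term_counter
          (terms_dict.insert placeholder term,
           query_parts ++ [pvSnippet column placeholder],
           term_counter + 1))
      (d, ps, c)
    =
    (((PySem.List.enumerate (ts.filter (fun t => !pvKw t)) c).map
        (fun p => ("term" ++ PySem.Int.toStr p.1, p.2))).foldl
        (fun acc p => acc.insert p.1 p.2) d,
     ps ++ pvAssemble column ts
        ((PySem.List.enumerate (ts.filter (fun t => !pvKw t)) c).map
          (fun p => ("term" ++ PySem.Int.toStr p.1, p.2))),
     c + (ts.filter (fun t => !pvKw t)).length) := by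
  induction ts with
  | nil =>
    intro d ps c
    simp [pvAssemble]
  | cons t ts ih =>
    intro d ps c
    by_cases h : pvKw t = true
    · simp only [List.foldl_cons, List.filter_cons, h, Bool.not_true, reduceIte,
        pvAssemble, ih]
      simp [List.append_assoc]
    · simp only [List.foldl_cons, List.filter_cons, Bool.not_eq_true] at *
      simp only [h, Bool.not_false, if_true, PySem.List.enumerate_cons,
        List.map_cons, List.foldl_cons, pvAssemble, ih]
      simp [List.append_assoc, Prod.ext_iff]
      ring

-- ===== VERDICT (by name: the statement is the Claim_ definition above) =====
theorem build_query_terms_spec : Claim_equal_build_query_terms := by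
  intro ts column _
  unfold Spec_build_query_terms build_query_terms build_query_terms_alt
  simp only [pv_loop column ts PySem.Dict.empty [] 1]
  rfl
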